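/-
  Vorbis/ResidueMapping.lean AT WORK: one example of each thing a function proof does with it.
      (a) check sites of decode_residue, vorbis_decode_packet_rest, vorbis_decode_initial, vorbis_deinit from `ResidueOK`,
          `MappingOK`, `ModeOK`, `ResidueDeinitOK`, `MappingDeinitOK`: `have s := h.site_… hL … ha`, `exact s.acc hc`
      (b) a group carried over one store (`frame` from `ObjSame`), over the struct copy `*f = p` (`transfer` from a `Copied` /
          a `Move`), over a change of the block predicate (`reblk`)
      (c) the residue / mapping / mode loops of start_decoder: the transients and their steps
      (d) T3: the request of decode_residue fits; the final test of start_decoder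
      (e) decode_residue's loops: WA / WB, FILL, the position invariant CI and its use around the callee
-/
import Vorbis.ResidueMapping
namespace Vorbis.ResidueMappingTest
open X86 X86.User Asan Vorbis

/-! ### (a) Check sites -/

/-- decode_residue 0x10ed43, `load4 r->part_size` with `r = residue_config + 32·rn`: the site in three lines; the address is
in the form `simp only [vacc, voff]` gives it (and the stepper, after `vfield`), `ha` closes the gap. -/
example (Live : Nat → Prop) (Blk : Block → Prop) (mem : Mem) (f rn : Nat) (hc : Covers Live mem) (hL : BlkLive Blk Live)
    (h : ResidueOK Blk mem f) (hrn : (rn : Int) < stb_vorbis.residue_count mem f) :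
    AccessibleSmall mem (mem.u64 (f + 456) + 32 * rn + 8) 4 := by
  have s := h.site_record hL hrn Off.Residue.part_size 4 (by simp only [voff]; omega) (by omega)
    (a := mem.u64 (f + 456) + 32 * rn + 8) (by simp only [vacc, voff])
  exact s.acc hc

/-- The same site as the walker meets it: `r14 = r` (set at 0x10eca6), the check routine is called with `rdi = r14 + 8`. -/
example (Live : Nat → Prop) (Blk : Block → Prop) (u : State) (f rn : Nat) (hc : Covers Live u.mem) (hL : BlkLive Blk Live)
    (h : ResidueOK Blk u.mem f) (hrn : (rn : Int) < stb_vorbis.residue_count u.mem f)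
    (hr : u.reg .r14 = addr (stb_vorbis.residue_config_at u.mem f rn)) :
    AccessibleSmall u.mem (u.reg .r14 + 8).toNat 4 := by
  rw [hr]
  simp only [vfield]
  have s := h.site_record hL hrn 8 4 (by simp only [voff]; omega) (by omega) rfl
  exact s.acc_addr hc

/-- The same with the template's block predicate, "allocated = live". -/
example (Live : Nat → Prop) (mem : Mem) (f rn : Nat) (hc : Covers Live mem) (h : ResidueOK (Block.live Live) mem f)
    (hrn : (rn : Int) < stb_vorbis.residue_count mem f) :
    AccessibleSmall mem (stb_vorbis.residue_config_at mem f rn + Off.Residue.classdata) 8 := by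
  have s := h.site_record (BlkLive.self Live) hrn Off.Residue.classdata 8 (by simp only [voff]; omega) (by omega) rfl
  exact s.acc hc

/-- decode_residue 0x10ecb8, `load2 f->residue_types[rn]`: inside `*f` (OB1's block as `hob`). -/
example (Live : Nat → Prop) (Blk : Block → Prop) (mem : Mem) (f rn : Nat) (hc : Covers Live mem) (hL : BlkLive Blk Live)
    (hob : Blk (objBlock f)) (h : ResidueOK Blk mem f) (hrn : (rn : Int) < stb_vorbis.residue_count mem f) :
    AccessibleSmall mem (f + 324 + 2 * rn) 2 := by
  have s := ResidueOK.site_type hL hob h.R1.2 hrn (a := f + 324 + 2 * rn) (by simp only [voff])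
  exact s.acc hc

/-- decode_residue 0x10f0eb, `load8 r->classdata[q]` after `if (q == EOP) goto done`: DECODE gave `q = −1 ∨ 0 ≤ q < entries`
(DecodeRaw), so after the test `q.toNat < E`. -/
example (Live : Nat → Prop) (Blk : Block → Prop) (mem : Mem) (f r : Nat) (q : Int) (hc : Covers Live mem)
    (hL : BlkLive Blk Live) (h : ResidueAtOK Blk mem f r)
    (hq : q = -1 ∨ (0 ≤ q ∧ q < Codebook.entries mem (Residue.cbk mem f r))) (hne : q ≠ -1) :
    AccessibleSmall mem (Residue.classdata mem r + 8 * q.toNat) 8 := by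
  have hq' : q.toNat < Residue.E mem f r := by
    unfold Residue.E
    omega
  have s := h.site_classdata hL hq' rfl
  exact s.acc hc

/-- decode_residue 0x10f22f / 0x10f256: `c = part_classdata[0][class_set][i]` through a filled slot, then
`residue_books[c][pass]`: the whole chain from the i-loop invariant. -/
example (Live : Nat → Prop) (Blk : Block → Prop) (mem : Mem) (f r : Nat) (TB : Block) (C PRD pass cs i pcount : Nat)
    (hc : Covers Live mem) (hL : BlkLive Blk Live) (h : ResidueAtOK Blk mem f r)
    (hw : WInnerInv mem f r TB C PRD (Residue.W mem f r) rowsA pass cs i pcount) (hi : i < Residue.W mem f r)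
    (hpass : pass < 8) :
    AccessibleSmall mem (mem.ptr (slot TB C PRD 0 cs) + i) 1 ∧
      AccessibleSmall mem (Residue.residue_books mem r + 16 * mem.u8 (mem.ptr (slot TB C PRD 0 cs) + i) + 2 * pass) 2 := by
  have hv : RowPtr mem f r (mem.ptr (slot TB C PRD 0 cs)) := hw.rowptr h.R7b (j := 0) rfl
  constructor
  · exact (hv.site hL h hi rfl).acc hc
  · exact (h.site_book hL (hv.class_lt h hi) hpass rfl).acc hc

/-- decode_residue 0x10f141: the residue book `f->codebooks + b` for `b = residue_books[c][pass] ≥ 0`: its `dimensions` field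
(residue_decode 0x10ea8d) is inside CB0's block. -/
example (Live : Nat → Prop) (Blk : Block → Prop) (mem : Mem) (f r c pass : Nat) (hc : Covers Live mem) (hL : BlkLive Blk Live)
    (h : ResidueAtOK Blk mem f r)
    (hcb : Blk ⟨stb_vorbis.codebooks mem f, Off.sizeof.Codebook * (stb_vorbis.codebook_count mem f).toNat⟩)
    (hcl : c < Residue.classifications mem r) (hp : pass < 8) (hb : 0 ≤ Residue.book mem r c pass) :
    AccessibleSmall mem (stb_vorbis.codebooks_at mem f (Residue.book mem r c pass).toNat + Off.Codebook.dimensions) 4 := by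
  have s := h.site_book_codebook hL hcb hcl hp hb Off.Codebook.dimensions 4 (by simp only [voff]; omega) (by omega) rfl
  exact s.acc hc

/-- vorbis_decode_packet_rest 0x11165b, `r = map->submap_residue[i]` with `map = &f->mapping[m->mapping]`, `m` a checked mode:
the load1 at `map + 33 + i`, and its value is a residue number: decode_residue's precondition P1. -/
example (Live : Nat → Prop) (Blk : Block → Prop) (mem : Mem) (f mode i : Nat) (hc : Covers Live mem) (hL : BlkLive Blk Live)
    (hM : MappingOK Blk mem f) (hD : ModeOK mem f) (hmode : (mode : Int) < stb_vorbis.mode_count mem f)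
    (hi : i < Mapping.submaps mem (stb_vorbis.mapping_at mem f (Mode.mapping mem (stb_vorbis.mode_config_at f mode)))) :
    AccessibleSmall mem (stb_vorbis.mapping_at mem f (Mode.mapping mem (stb_vorbis.mode_config_at f mode)) + 33 + i) 1 ∧
      (Mapping.submap_residue mem (stb_vorbis.mapping_at mem f (Mode.mapping mem (stb_vorbis.mode_config_at f mode))) i : Int)
        < stb_vorbis.residue_count mem f := by
  have hrec := hM.of_mode hD hmode
  have h3 := hrec.MP3
  constructor
  · have s := hM.site_submap_residue hL (hD.mapping_lt hmode) (s := i) (by simp only [voff]; omega)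
      (a := stb_vorbis.mapping_at mem f (Mode.mapping mem (stb_vorbis.mode_config_at f mode)) + 33 + i)
      (by simp only [voff])
    exact s.acc hc
  · exact hrec.residue_lt hi

/-- vorbis_decode_packet_rest, inverse coupling: `f->channel_buffers[map->chan[i].magnitude][j]`, `j < n2`, `n ≤ b1`. -/
example (Live : Nat → Prop) (Blk : Block → Prop) (mem : Mem) (f m k j n2 : Nat) (hc : Covers Live mem) (hL : BlkLive Blk Live)
    (h : MappingAtOK Blk mem f m) (hk : k < Mapping.coupling_steps mem m)
    (hM6 : ∀ c : Nat, (c : Int) < stb_vorbis.channels mem f → Blk ⟨stb_vorbis.channel_buffers mem f c, 4 * bsize mem f 1⟩)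
    (hj : j < n2) (hn2 : n2 ≤ bsize mem f 1) :
    AccessibleSmall mem
      (stb_vorbis.channel_buffers_at mem f (MappingChannel.magnitude mem (Mapping.chan_at mem m k)) j) 4 := by
  have s := site_channel_buffer hL hM6 (h.magnitude_lt hk) hj hn2 rfl
  exact s.acc hc

/-- vorbis_decode_packet_rest, the floor loop: `map->chan[i].mux` (load1 at `chan + 3i + 2`), then `map->submap_floor[mux]`. -/
example (Live : Nat → Prop) (Blk : Block → Prop) (mem : Mem) (f m i : Nat) (hc : Covers Live mem) (hL : BlkLive Blk Live)
    (h : MappingAtOK Blk mem f m) (hi : (i : Int) < stb_vorbis.channels mem f) :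
    AccessibleSmall mem (Mapping.chan mem m + 3 * i + 2) 1 ∧
      (Mapping.submap_floor mem m (MappingChannel.mux mem (Mapping.chan_at mem m i)) : Int) < stb_vorbis.floor_count mem f := by
  constructor
  · have s := h.site_chan hL hi Off.MappingChannel.mux 1 (by simp only [voff]; omega) (by omega)
      (a := Mapping.chan mem m + 3 * i + 2) (by simp only [vacc, voff])
    exact s.acc hc
  · exact h.floor_of_mux_lt hi

/-- vorbis_decode_initial 0x… `load1 f->mode_config[i].blockflag` at `f + 484 + 6i` after the mode number test. -/
example (Live : Nat → Prop) (Blk : Block → Prop) (mem : Mem) (f i : Nat) (hc : Covers Live mem) (hL : BlkLive Blk Live)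
    (hob : Blk (objBlock f)) (h : ModeOK mem f) (hi : (i : Int) < stb_vorbis.mode_count mem f) :
    AccessibleSmall mem (f + 484 + 6 * i + 0) 1 := by
  have s := h.site_mode hL hob hi Off.Mode.blockflag 1 (by simp only [voff]; omega) (by omega)
    (a := f + 484 + 6 * i + 0) (by simp only [vacc, voff])
  exact s.acc hc

/-- vorbis_deinit: `p->mapping[i].chan` (load8 at `mapping + 56i + 8`) after the NULL test of `p->mapping`, from H5. -/
example (Live : Nat → Prop) (Blk : Block → Prop) (mem : Mem) (f i : Nat) (hc : Covers Live mem) (hL : BlkLive Blk Live)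
    (h : MappingDeinitOK Blk mem f) (hne : stb_vorbis.mapping mem f ≠ 0) (hi : (i : Int) < stb_vorbis.mapping_count mem f) :
    AccessibleSmall mem (stb_vorbis.mapping_at mem f i + Off.Mapping.chan) 8 := by
  have s := h.site_record hL hne hi Off.Mapping.chan 8 (by simp only [voff]; omega) (by omega) rfl
  exact s.acc hc

/-- vorbis_deinit: `r->classdata[j]` after the two NULL tests, from R9. -/
example (Live : Nat → Prop) (Blk : Block → Prop) (mem : Mem) (f i j : Nat) (hc : Covers Live mem) (hL : BlkLive Blk Live)
    (h : ResidueDeinitOK Blk mem f) (hne : stb_vorbis.residue_config mem f ≠ 0)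
    (hi : (i : Int) < stb_vorbis.residue_count mem f)
    (hcd : Residue.classdata mem (stb_vorbis.residue_config_at mem f i) ≠ 0)
    (hj : j < Residue.E mem f (stb_vorbis.residue_config_at mem f i)) :
    AccessibleSmall mem (Residue.classdata mem (stb_vorbis.residue_config_at mem f i) + 8 * j) 8 := by
  have s := h.site_classdata hL hne hi hcd hj rfl
  exact s.acc hc

/-! ### (b) Carried over a store; carried over the struct copy `*f = p`

`P.transfer` is the one lemma; its three uses: from `ObjSame` (same address: `P.frame`), from a `Copied` (the object moved),
with `mem' = mem` (`P.reblk`: only the block predicate changed). -/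

/-- A store of 4 bytes inside a block `Cb` (a channel buffer, the temp block, a stack object) that is disjoint from `*f`, from
the codebooks block and from everything `ResidueOK` owns keeps `ResidueOK`. The disjointness facts are what `BlkOK.apart`
gives for allocated blocks (`BlkOK.kept_store`): here they are hypotheses. -/
example (Blk : Block → Prop) (mem : Mem) (f b v : Nat) (Cb : Block) (h : ResidueOK Blk mem f) (hb : Cb.contains b 4)
    (hCb : Cb.base + Cb.size ≤ 2 ^ 64) (hf : (objBlock f).disjoint Cb) (hftop : f + 1808 ≤ 2 ^ 64)
    (hrd : ∀ B, ResidueOK.Reads mem f B → B.disjoint Cb ∧ B.base + B.size ≤ 2 ^ 64) :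
    ResidueOK Blk (mem.writeLE (addr b) 4 v) f := by
  have hfk : (objBlock f).Kept mem (mem.writeLE (addr b) 4 v) :=
    Block.Kept.of_writeLE mem b 4 v hf hb hCb (by simp only [vblock, voff]; omega)
  apply h.frame (ObjSame.of_same hfk.same (by simp only [voff]; omega))
  intro B hB
  exact Block.Kept.of_writeLE mem b 4 v (hrd B hB).1 hb hCb (hrd B hB).2

/-- The same store with `BlkOK`: the target `Cb` is an allocated block that `ResidueOK` does not read, `*f` and CB0's block are
allocated: every hypothesis of `frame` comes from `BlkOK.kept_store`. -/
example (Blk : Block → Prop) (hok : BlkOK Blk) (mem : Mem) (f b v : Nat) (Cb : Block) (h : ResidueOK Blk mem f)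
    (hCb : Blk Cb) (hb : Cb.contains b 4) (hob : Blk (objBlock f)) (hfne : objBlock f ≠ Cb)
    (hcb : Blk ⟨stb_vorbis.codebooks mem f, Off.sizeof.Codebook * (stb_vorbis.codebook_count mem f).toNat⟩)
    (hne : ∀ B, ResidueOK.Reads mem f B → B ≠ Cb) : ResidueOK Blk (mem.writeLE (addr b) 4 v) f := by
  have hfk := hok.kept_store hob hCb hfne mem v hb
  have hin := hok.inside _ hob
  simp only [vblock, voff] at hin
  apply h.frame (ObjSame.of_same hfk.same (by simp only [voff]; omega))
  intro B hB
  exact hok.kept_store (h.reads_blk hcb hB) hCb (hne B hB) mem v hb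

/-- **`ResidueOK` over the struct copy** `*f = p` (stb_vorbis_open_memory, after `memcpy(f, &p, 1808)`): `transfer` from a
`Copied`. The copy writes the new block only, so every block that is read is kept. -/
example (Blk : Block → Prop) (mem mem' : Mem) (p f : Nat) (h : ResidueOK Blk mem p)
    (hcp : Copied mem p mem' f Off.sizeof.stb_vorbis) (hk : ∀ B, ResidueOK.Reads mem p B → B.Kept mem mem') :
    ResidueOK Blk mem' f :=
  h.transfer (ObjEq.of_copied hcp (by decide)) hk (fun _ _ hb => hb)

/-- The same from a `Move` (Vorbis/Blocks.lean §5), with the block predicate growing by the new block, CB0's block given. -/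
example (Blk Blk' : Block → Prop) (mem mem' : Mem) (p f : Nat) (hm : Move Blk Blk' mem mem' p f) (h : ResidueOK Blk mem p)
    (hcb : Blk ⟨stb_vorbis.codebooks mem p, Off.sizeof.Codebook * (stb_vorbis.codebook_count mem p).toNat⟩) :
    ResidueOK Blk' mem' f :=
  h.transfer (hm.objEq (by decide)) (fun _ hB => hm.kept (h.reads_blk hcb hB)) (fun B _ hb => hm.sub B hb)

/-- Only the block predicate changes (a temp block was freed): `reblk`. -/
example (Blk Blk' : Block → Prop) (mem : Mem) (f : Nat) (h : ResidueOK Blk mem f)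
    (hB : ∀ B, ResidueOK.Owns mem f B → Blk B → Blk' B) : ResidueOK Blk' mem f :=
  h.reblk hB

/-- R9 from `ObjSame`. -/
example (Blk : Block → Prop) (mem mem' : Mem) (f : Nat) (h : ResidueDeinitOK Blk mem f) (hs : ObjSame f mem mem')
    (hk : ∀ B, ResidueDeinitOK.Reads mem f B → B.Kept mem mem') : ResidueDeinitOK Blk mem' f :=
  h.transfer (hs.sub (by decide)) hk (fun _ _ hb => hb)

/-- R9 over the struct copy. -/
example (Blk : Block → Prop) (mem mem' : Mem) (p f : Nat) (h : ResidueDeinitOK Blk mem p)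
    (hcp : Copied mem p mem' f Off.sizeof.stb_vorbis) (hk : ∀ B, ResidueDeinitOK.Reads mem p B → B.Kept mem mem') :
    ResidueDeinitOK Blk mem' f :=
  h.transfer (ObjEq.of_copied hcp (by decide)) hk (fun _ _ hb => hb)

/-- The same store keeps `ModeOK` (everything it reads is in `*f`). -/
example (mem : Mem) (f b v : Nat) (Cb : Block) (h : ModeOK mem f) (hb : Cb.contains b 4) (hCb : Cb.base + Cb.size ≤ 2 ^ 64)
    (hf : (objBlock f).disjoint Cb) (hftop : f + 1808 ≤ 2 ^ 64) : ModeOK (mem.writeLE (addr b) 4 v) f := by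
  have hfk : (objBlock f).Kept mem (mem.writeLE (addr b) 4 v) :=
    Block.Kept.of_writeLE mem b 4 v hf hb hCb (by simp only [vblock, voff]; omega)
  exact h.frame (ObjSame.of_same hfk.same (by simp only [voff]; omega))

/-- `ModeOK` from `ObjSame` through `transfer`. -/
example (mem mem' : Mem) (f : Nat) (h : ModeOK mem f) (hs : ObjSame f mem mem') : ModeOK mem' f :=
  h.transfer (hs.sub (by decide))

/-- `ModeOK` from `DecodeSame` (the decode path: the bit reader, `eof`, `error`, the output fields of `*f` are stored to). -/
example (mem mem' : Mem) (f : Nat) (h : ModeOK mem f) (hs : DecodeSame f mem mem') : ModeOK mem' f :=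
  h.transfer (hs.sub (by decide))

/-- `ResidueOK` from `DecodeSame`. -/
example (Blk : Block → Prop) (mem mem' : Mem) (f : Nat) (h : ResidueOK Blk mem f) (hs : DecodeSame f mem mem')
    (hk : ∀ B, ResidueOK.Reads mem f B → B.Kept mem mem') : ResidueOK Blk mem' f :=
  h.transfer (hs.sub (by decide)) hk (fun _ _ hb => hb)

/-- `ModeOK` over the struct copy. -/
example (mem mem' : Mem) (p f : Nat) (h : ModeOK mem p) (hcp : Copied mem p mem' f Off.sizeof.stb_vorbis) : ModeOK mem' f :=
  h.transfer (ObjEq.of_copied hcp (by decide))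

/-- A callee's footprint (`Mem.SameExcept`) off `*f` and off the blocks keeps `MappingOK`. -/
example (Blk : Block → Prop) (mem mem' : Mem) (f : Nat) (ws : List Span) (hs : Mem.SameExcept ws mem mem')
    (h : MappingOK Blk mem f) (hftop : f + 1808 ≤ 2 ^ 64) (hfd : ∀ w, w ∈ ws → w.hi ≤ f ∨ f + 1808 ≤ w.lo)
    (hown : ∀ B, MappingOK.Owns mem f B → (∀ w, w ∈ ws → B.base + B.size ≤ w.lo ∨ w.hi ≤ B.base) ∧ B.base + B.size ≤ 2 ^ 64) :
    MappingOK Blk mem' f := by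
  have hos : ObjSame f mem mem' := by
    apply ObjSame.of_sameExcept hs (by simp only [voff]; omega)
    intro w hw
    cases hfd w hw with
    | inl h1 => exact Or.inl h1
    | inr h2 => exact Or.inr (Or.inl h2)
  apply h.frame hos
  intro B hB
  exact Block.Kept.of_sameExcept hs (hown B hB).1 (hown B hB).2

/-- `MappingOK` from `ObjSame` through `transfer`. -/
example (Blk : Block → Prop) (mem mem' : Mem) (f : Nat) (h : MappingOK Blk mem f) (hs : ObjSame f mem mem')
    (hk : ∀ B, MappingOK.Reads mem f B → B.Kept mem mem') : MappingOK Blk mem' f :=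
  h.transfer (hs.sub (by decide)) hk (fun _ _ hb => hb)

/-- `MappingOK` over the struct copy, from a `Move`: every hypothesis comes from the move and `reads_blk`. -/
example (Blk Blk' : Block → Prop) (mem mem' : Mem) (p f : Nat) (hm : Move Blk Blk' mem mem' p f) (h : MappingOK Blk mem p) :
    MappingOK Blk' mem' f :=
  h.transfer (ObjEq.of_copied hm.copied (by decide)) (fun _ hB => hm.kept (h.reads_blk hB)) (fun B _ hb => hm.sub B hb)

/-- H5 from `ObjSame` (no block content is read). -/
example (Blk : Block → Prop) (mem mem' : Mem) (f : Nat) (h : MappingDeinitOK Blk mem f) (hs : ObjSame f mem mem') :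
    MappingDeinitOK Blk mem' f :=
  h.transfer (hs.sub (by decide)) (fun _ _ hb => hb)

/-- H5 over the struct copy. -/
example (Blk : Block → Prop) (mem mem' : Mem) (p f : Nat) (h : MappingDeinitOK Blk mem p)
    (hcp : Copied mem p mem' f Off.sizeof.stb_vorbis) : MappingDeinitOK Blk mem' f :=
  h.transfer (ObjEq.of_copied hcp (by decide)) (fun _ _ hb => hb)

/-- T1 from `ObjSame`; the `residue_config` block it reads is `ResidueOK`'s (R2: `T1.Reads.owned`), R1 gives `h1`. -/
example (Blk : Block → Prop) (mem mem' : Mem) (f : Nat) (h : T1 mem f) (hR : ResidueOK Blk mem f) (hs : ObjSame f mem mem')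
    (hk : ∀ B, ResidueOK.Reads mem f B → B.Kept mem mem') : T1 mem' f :=
  h.transfer (hs.sub (by decide)) hR.R1.2 (fun B hB => hk B (ResidueOK.Reads.owns hB.owned))

/-- T1 over the struct copy. -/
example (Blk : Block → Prop) (mem mem' : Mem) (p f : Nat) (h : T1 mem p) (hR : ResidueOK Blk mem p)
    (hcp : Copied mem p mem' f Off.sizeof.stb_vorbis) (hk : ∀ B, T1.Reads mem p B → B.Kept mem mem') : T1 mem' f :=
  h.transfer (ObjEq.of_copied hcp (by decide)) hR.R1.2 hk

/-! ### (c) The loops of start_decoder -/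

/-- The residue loop 4043: the invariant at the head, one completed record, the invariant at the next head; at the exit
`ResidueOK`; at an error exit inside record `n` (here 4077: `classdata = NULL` stored) the deinit form R9. -/
example (Blk : Block → Prop) (mem : Mem) (f n : Nat) (h : ResidueUpTo Blk mem f n)
    (hn : (n : Int) < stb_vorbis.residue_count mem f) (h3 : stb_vorbis.residue_types mem f n ≤ 2)
    (hr : ResidueAtOK Blk mem f (stb_vorbis.residue_config_at mem f n)) : ResidueUpTo Blk mem f (n + 1) :=
  h.succ hn h3 hr

/-- … at the exit of the loop: `ResidueOK`. -/
example (Blk : Block → Prop) (mem : Mem) (f n : Nat) (h : ResidueUpTo Blk mem f n)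
    (hn : (n : Int) = stb_vorbis.residue_count mem f) : ResidueOK Blk mem f :=
  h.toOK hn

/-- … at the error exit 4077 inside record `n`: R9. -/
example (Blk : Block → Prop) (mem : Mem) (f n : Nat) (h : ResidueUpTo Blk mem f n) (hz : ResidueZeroFrom mem f (n + 1))
    (hcb : stb_vorbis.codebooks mem f ≠ 0) (h0 : Residue.classdata mem (stb_vorbis.residue_config_at mem f n) = 0) :
    ResidueDeinitOK Blk mem f :=
  h.deinit hz hcb (fun _ => Or.inl h0)

/-- The head of iteration `n` of the residue loop: the store `f->residue_types[n] = get_bits(f, 16)` (2 bytes at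
`f + 324 + 2n`, inside `*f`) keeps RES(n): it misses the windows `ResidueUpTo.wins n`, and every block that is read is
disjoint from `*f` (hypothesis `hk`; from `BlkOK.kept_store`). -/
example (Blk : Block → Prop) (mem : Mem) (f n v : Nat) (h : ResidueUpTo Blk mem f n) (hftop : f + 1808 ≤ 2 ^ 64)
    (hk : ∀ B, ResidueUpTo.Reads mem f n B → B.Kept mem (mem.writeLE (addr (f + 324 + 2 * n)) 2 v)) :
    ResidueUpTo Blk (mem.writeLE (addr (f + 324 + 2 * n)) 2 v) f n := by
  have hn : n ≤ 64 := by
    have := h.n_le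
    have := h.R1
    omega
  have e : (addr (f + 324 + 2 * n)).toNat = f + 324 + 2 * n := toNat_addr _ (by omega)
  apply h.transfer_below _ hk (fun _ _ hb => hb)
  apply ObjEq.of_writeLE mem f (addr (f + 324 + 2 * n)) 2 v (by omega)
  · intro w hw
    simp only [ResidueUpTo.wins, List.mem_cons, List.mem_nil_iff, or_false] at hw
    rcases hw with rfl | rfl | rfl <;> simp only [] <;> omega
  · intro w hw
    simp only [ResidueUpTo.wins, List.mem_cons, List.mem_nil_iff, or_false] at hw
    rcases hw with rfl | rfl | rfl <;> simp only [] <;> omega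

/-- Loop 4065 (start_decoder.R5), the `−1` arm: `mov WORD [residue_books + 16j + 2k], 0xffff`. The store does not hit the record
(`hrb'`) nor `f->codebook_count` (`hcount`). -/
example (mem : Mem) (f r rb j k : Nat) (h : ResBooksUpTo mem f r j k) (hk : k < 8) (hrb : Residue.residue_books mem r = rb)
    (hrb' : Residue.residue_books (mem.writeLE (addr (rb + 16 * j + 2 * k)) 2 0xffff) r = rb)
    (hcount : stb_vorbis.codebook_count (mem.writeLE (addr (rb + 16 * j + 2 * k)) 2 0xffff) f = stb_vorbis.codebook_count mem f)
    (htop : rb + 16 * j + 16 ≤ 2 ^ 64) :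
    ResBooksUpTo (mem.writeLE (addr (rb + 16 * j + 2 * k)) 2 0xffff) f r j (k + 1) := by
  apply h.step hcount
  · intro j' k' hk' hlt
    exact Residue.book_writeLE_other mem r rb j k j' k' 0xffff hrb hrb' hk hk' (by omega) (by omega) (by omega)
  · rw [Residue.book_writeLE_same mem r rb j k 0xffff hrb']
    exact BookOK.minus_one _ f

/-- The mode loop 4143: one more checked record. -/
example (mem : Mem) (f n : Nat) (h : ModeUpTo mem f n) (hn : (n : Int) < stb_vorbis.mode_count mem f)
    (hr : ModeRecOK mem f n) : ModeUpTo mem f (n + 1) :=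
  h.succ hn hr

/-- Iteration `n` of the mode loop stores into `f->mode_config[n]` (here `m->mapping`, 1 byte at `f + 484 + 6n + 1`, inside
`*f`): the store misses the windows `ModeUpTo.wins n`, so the invariant of the loop is kept (`transfer_below`). -/
example (mem : Mem) (f n v : Nat) (h : ModeUpTo mem f n) (hftop : f + 1808 ≤ 2 ^ 64) :
    ModeUpTo (mem.writeLE (addr (f + 484 + 6 * n + 1)) 1 v) f n := by
  have hn : n ≤ 64 := by
    have := h.n_le
    have := h.MD1
    omega
  have e : (addr (f + 484 + 6 * n + 1)).toNat = f + 484 + 6 * n + 1 := toNat_addr _ (by omega)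
  apply h.transfer_below
  apply ObjEq.of_writeLE mem f (addr (f + 484 + 6 * n + 1)) 1 v (by omega)
  · intro w hw
    simp only [ModeUpTo.wins, List.mem_cons, List.mem_nil_iff, or_false] at hw
    rcases hw with rfl | rfl <;> simp only [] <;> omega
  · intro w hw
    simp only [ModeUpTo.wins, List.mem_cons, List.mem_nil_iff, or_false] at hw
    rcases hw with rfl | rfl <;> simp only [] <;> omega

/-- The submap loop 4132: MP6 below the counter, one more submap. -/
example (mem : Mem) (f m j : Nat) (h : ∀ s, s < j → Mapping.SubmapOK mem f m s) (hj : Mapping.SubmapOK mem f m j) :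
    ∀ s, s < j + 1 → Mapping.SubmapOK mem f m s :=
  Res.forall_lt_succ h hj

/-! ### (d) T1, T3, the final test -/

/-- decode_residue.1: the request of `temp_block_array` is at most `temp_memory_required` (then ADO ⇒ the allocation succeeds). -/
example (Blk : Block → Prop) (mem : Mem) (f rn n : Nat) (hT1 : T1 mem f) (hR : ResidueOK Blk mem f)
    (hrn : (rn : Int) < stb_vorbis.residue_count mem f) (hn : n = bsize mem f 1 / 2) :
    nchan mem f * (8 + 8 * Residue.partReadDec mem f rn n) ≤ stb_vorbis.temp_memory_required mem f :=
  T3_decode_residue hT1 hR hrn (by omega)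

/-- start_decoder.R17 → P5: the final test with `+ 2*ARENA_REDZONE` gives ADO's room after `vorbis_alloc`. -/
example (S T tmr : Nat) (h : S + 1808 + tmr + 64 ≤ T) : tmr + 32 ≤ T - (S + 1840) := (Res.final_test h).1

/-- start_decoder.R18: one turn of the estimate loop. -/
example (mem : Mem) (f i : Nat) : maxPartRead mem f (i + 1) = max (maxPartRead mem f i) (Residue.partReadEst mem f i) :=
  maxPartRead_succ mem f i

/-! ### (e) decode_residue's loops -/

/-- Pass 0, path A (decode_residue.5): the store `part_classdata[0][class_set] = r->classdata[q]` is inside the temp block, and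
after it the i-loop's invariant holds with `i = 0`. `hrow` = row pointers stay row pointers over the store (`RowPtr.frame`). -/
example (Live : Nat → Prop) (mem : Mem) (f r q pcount cs : Nat) (TB : Block) (C PRD : Nat) (hc : Covers Live mem)
    (hTB : TB.live Live) (hC : 0 < C) (ht : TempRows mem TB C PRD) (htop : TB.base + TB.size ≤ 2 ^ 64)
    (hw : WInv mem f r TB C PRD (Residue.W mem f r) rowsA 0 cs pcount) (hW : 1 ≤ Residue.W mem f r) (hlt : pcount < PRD)
    (hq : q < Residue.E mem f r)
    (hrow : ∀ w, RowPtr mem f r w → RowPtr (mem.writeLE (addr (slot TB C PRD 0 cs)) 8 (Residue.row mem r q)) f r w) :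
    AccessibleSmall mem (mem.ptr (TB.base + 8 * 0) + 8 * cs) 8 ∧
      WInnerInv (mem.writeLE (addr (slot TB C PRD 0 cs)) 8 (Residue.row mem r q)) f r TB C PRD (Residue.W mem f r) rowsA 0 cs 0
        pcount := by
  have hcs := hw.slot_lt hW hlt
  constructor
  · exact (ht.site_slot hTB hC hcs rfl).acc hc
  · apply hw.enter0 hlt
    intro j hj
    have e : j = 0 := hj
    subst e
    exact (hw.fill0 rfl 0 rfl).store hC hcs ht.size htop _ (mem.ptr_lt _) hrow (RowPtr.of_row mem f r hq)

/-- The end of a pass: the `while` is left; the next pass starts with every row filled up to `KK`. -/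
example (mem : Mem) (f r : Nat) (TB : Block) (C PRD W pass cs pcount : Nat) (hw : WInv mem f r TB C PRD W rowsA pass cs pcount)
    (hW : 1 ≤ W) (hge : PRD ≤ pcount) : WInv mem f r TB C PRD W rowsA (pass + 1) 0 0 :=
  WInv.initK (by omega) (hw.exit_fill hW hge)

/-- The measure of the `while`: a turn of the loop (head with `pcount0 < part_read`, i-loop left) increases `pcount`. -/
example (W PRD cs i pcount pcount0 : Nat) (h0 : Res.WHead W PRD cs pcount0) (hlt : pcount0 < PRD)
    (h : Res.WInner W PRD cs i pcount) (hW : 1 ≤ W) (hex : W ≤ i ∨ PRD ≤ pcount) : PRD - pcount < PRD - pcount0 := by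
  have := h.progress h0 hlt hW hex
  have := h.pcount_le
  omega

/-- Path A, `while` head: `c_inter = z % ch`, `p_inter = z / ch` from `z = begin + pcount·part_size` establish CI (fact K), the
precondition of codebook_decode_deinterleave_repeat; its postcondition on a result 1 is CI again, so the NEXT call inside the
same class word has its precondition although the position has drifted from `z(pcount + 1)`. -/
example (Blk : Block → Prop) (mem : Mem) (f r cp pp n ch pc : Nat) (h : ResidueAtOK Blk mem f r) (hch : 2 ≤ ch)
    (hpc : pc < Residue.partRead mem r (Res.actualDec 2 n))
    (hc : mem.i32 cp = (((Residue.begin mem r + pc * Residue.part_size mem r) % ch : Nat) : Int))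
    (hp : mem.i32 pp = (((Residue.begin mem r + pc * Residue.part_size mem r) / ch : Nat) : Int)) :
    InterAt mem cp pp ch n := by
  have hk := Residue.factK_pos h hch hpc
  exact InterAt.of_z (by omega) (by omega) hc hp

/-- Inside codebook_decode_deinterleave_repeat: from the head invariant through the clamp (FIX 5, FIX 10 not taken) to the store
`outputs[c_inter][p_inter]` of the first element: `p_inter < len`. -/
example (c p ch len eff dim : Nat) (h : Res.DeintInv c p ch len eff dim)
    (hgo : ¬ (len * ch < p * ch + c + eff ∧ len * ch - (p * ch + c) = 0)) :
    c < ch ∧ p < len := by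
  have hcl := Res.clamp_ok h.inter.pos_le h.eff_pos hgo
  have hin := Res.DeintInner.init h.inter hcl.2.2
  exact hin.store_ok hcl.1

/-! ### No axiom beyond Lean's three -/

#print axioms ResidueOK.transfer
#print axioms ResidueOK.reblk
#print axioms ResidueDeinitOK.transfer
#print axioms MappingOK.transfer
#print axioms MappingDeinitOK.transfer
#print axioms ModeOK.transfer
#print axioms T1.transfer
#print axioms T3_decode_residue
#print axioms ResidueOK.site_record
#print axioms TempRows.site_slot
#print axioms ResidueUpTo.deinit
#print axioms Fill.store
#print axioms WInnerInv.rowptr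
#print axioms Res.factK
#print axioms Res.DeintInner.done
#print axioms InterAt.of_z

end Vorbis.ResidueMappingTest
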